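-- pv_equiv track=rewrite | github.com/conNULL/Gait-Characteristics | Gait_Analysis_Utils.py | mergeAlternateSequence
-- ===== SOURCE A (Python) =====
-- def mergeAlternateSequence(arr1,arr2):
--     '''
--     Merges arrays featuring elements that alternate between elements from arrays and start with an element from arr1
--     '''
--
--     i = 0
--     j = 0
--     out = [0]
--     while arr1[i+1] < arr2[j]:
--         i += 1
--
--     out.append(arr1[i])
--
--     while j < len(arr2) or i < len(arr1):
--
--         if  i == len(arr1) or (j < len(arr2) and arr2[j] < arr1[i]):
--             if arr2[j] > out[-1]:
--                 out.append(arr2[j])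
--             j +=1
--         elif  j == len(arr2) or (i < len(arr1) and arr1[i] <= arr2[j]):
--             if arr1[i] > out[-1]:
--                 out.append(arr1[i])
--             i += 1
--
--     return out[1:]
-- ===== SOURCE B (Python) =====
-- def mergeAlternateSequence(arr1, arr2):
--     '''
--     Same result in two clean passes instead of A's single fused loop: first a
--     plain left-biased two-way merge (no dedup logic, tails appended wholesale),
--     then one strictly-increasing filter scan; no [0] sentinel anywhere.
--     '''
--     i = 0
--     while arr1[i + 1] < arr2[0]:
--         i += 1
--     xs, ys = arr1[i:], arr2
--     merged = []
--     a = 0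
--     b = 0
--     while a < len(xs) and b < len(ys):
--         if ys[b] < xs[a]:
--             merged.append(ys[b])
--             b += 1
--         else:
--             merged.append(xs[a])
--             a += 1
--     merged += xs[a:] + ys[b:]
--     out = [arr1[i]]
--     for v in merged:
--         if v > out[-1]:
--             out.append(v)
--     return out
-- ===== Notes on version B (the rewrite author's own statement) =====
-- stated objective: alternative
-- what changed: Splits A's single fused loop (which interleaves the two-pointer merge with the deduplication test against out[-1] and a [0] sentinel, re-checking i==len/j==len each round) into two plain passes: a bare left-biased merge whose leftovers are appended wholesale, then one separate strictly-increasing filter scan starting from arr1[i_start].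
import Mathlib
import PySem

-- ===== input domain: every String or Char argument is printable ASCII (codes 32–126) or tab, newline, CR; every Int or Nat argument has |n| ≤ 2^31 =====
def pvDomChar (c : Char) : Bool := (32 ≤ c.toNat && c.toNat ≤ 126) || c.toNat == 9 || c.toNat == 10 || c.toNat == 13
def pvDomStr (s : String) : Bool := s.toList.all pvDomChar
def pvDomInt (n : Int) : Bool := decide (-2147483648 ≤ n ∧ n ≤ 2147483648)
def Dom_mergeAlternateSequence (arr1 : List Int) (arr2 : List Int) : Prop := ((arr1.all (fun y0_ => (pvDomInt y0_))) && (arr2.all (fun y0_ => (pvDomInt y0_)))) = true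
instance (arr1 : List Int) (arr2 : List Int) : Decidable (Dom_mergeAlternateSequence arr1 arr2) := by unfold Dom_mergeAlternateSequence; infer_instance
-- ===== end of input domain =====

-- B keeps A's start-index preamble but splits A's single fused loop (merge
-- interleaved with dedup against out[-1] and a [0] sentinel) into two plain passes:
-- a bare left-biased merge, then one strictly-increasing filter scan (alternative).


-- ===== PORT A =====
-- preamble loop `while arr1[i+1] < arr2[0]: i += 1` (textually identical in A and in
-- B, so shared); fuel = arr1.length bounds the scan; an out-of-range access (Python:
-- IndexError, excluded by Pre_) stops with the current i.
def pvScanStart (arr1 : List Int) (b : Int) : Nat → Nat → Nat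
  | 0, i => i
  | fuel+1, i =>
    match arr1[i+1]? with
    | some x => if x < b then pvScanStart arr1 b fuel (i+1) else i
    | none => i

-- the `while j < len(arr2) or i < len(arr1)` loop of A, state (i, j, out); every index
-- used is in range when it is read (Python never raises here), so getD is exact;
-- fuel = len1+len2+1 suffices since each iteration advances i or j.
def pvMergeLoop (arr1 arr2 : List Int) : Nat → Nat → Nat → List Int → List Int
  | 0, _, _, out => out
  | fuel+1, i, j, out =>
    if j < arr2.length ∨ i < arr1.length then
      if i = arr1.length ∨ (j < arr2.length ∧ arr2.getD j 0 < arr1.getD i 0) then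
        pvMergeLoop arr1 arr2 fuel i (j+1)
          (if arr2.getD j 0 > out.getLastD 0 then out ++ [arr2.getD j 0] else out)
      else if j = arr2.length ∨ (i < arr1.length ∧ arr1.getD i 0 ≤ arr2.getD j 0) then
        pvMergeLoop arr1 arr2 fuel (i+1) j
          (if arr1.getD i 0 > out.getLastD 0 then out ++ [arr1.getD i 0] else out)
      else pvMergeLoop arr1 arr2 fuel i j out   -- unreachable (one branch always fires)
    else out

def mergeAlternateSequence (arr1 : List Int) (arr2 : List Int) : List Int :=
  let i := pvScanStart arr1 (arr2.getD 0 0) arr1.length 0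
  (pvMergeLoop arr1 arr2 (arr1.length + arr2.length + 1) i 0 [0, arr1.getD i 0]).drop 1

-- ===== PORT B =====
-- B's first pass: `while a < len(xs) and b < len(ys)` appending the smaller head
-- (ties to xs), then `merged += xs[a:] + ys[b:]`; indices read are always in range,
-- so getD is exact; fuel = len(xs)+len(ys) suffices (each round advances a or b).
def pvMergeB (xs ys : List Int) : Nat → Nat → Nat → List Int → List Int
  | 0, a, b, merged => merged ++ (xs.drop a ++ ys.drop b)
  | fuel+1, a, b, merged =>
    if a < xs.length ∧ b < ys.length then
      if ys.getD b 0 < xs.getD a 0 then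
        pvMergeB xs ys fuel a (b+1) (merged ++ [ys.getD b 0])
      else
        pvMergeB xs ys fuel (a+1) b (merged ++ [xs.getD a 0])
    else merged ++ (xs.drop a ++ ys.drop b)

-- same preamble as A (arr1[i:] with i ≥ 0 is drop), merge pass, then the filter
-- fold `if v > out[-1]: out.append(v)` starting from [arr1[i]].
def mergeAlternateSequence_alt (arr1 : List Int) (arr2 : List Int) : List Int :=
  let i := pvScanStart arr1 (arr2.getD 0 0) arr1.length 0
  let xs := arr1.drop i
  (pvMergeB xs arr2 (xs.length + arr2.length) 0 0 []).foldl
    (fun out v => if v > out.getLastD 0 then out ++ [v] else out) [arr1.getD i 0]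

-- ===== PRECONDITION & SPEC =====
-- exactly the inputs on which A returns: arr2 nonempty (else arr2[0] raises
-- IndexError) and some element of arr1[1:] at least arr2[0] (else the preamble
-- loop runs off the end of arr1 and raises IndexError).
def Pre_mergeAlternateSequence (arr1 : List Int) (arr2 : List Int) : Prop :=
  arr2 ≠ [] ∧ ∃ x ∈ arr1.tail, arr2.getD 0 0 ≤ x
instance (arr1 : List Int) (arr2 : List Int) : Decidable (Pre_mergeAlternateSequence arr1 arr2) := by
  unfold Pre_mergeAlternateSequence; infer_instance

def pvWitness_mergeAlternateSequence : List Int × List Int := ([1, 3, 5], [2, 4])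

def Spec_mergeAlternateSequence (arr1 : List Int) (arr2 : List Int) (out : List Int) : Prop := out = mergeAlternateSequence_alt arr1 arr2
instance (arr1 : List Int) (arr2 : List Int) (out : List Int) : Decidable (Spec_mergeAlternateSequence arr1 arr2 out) := by unfold Spec_mergeAlternateSequence; infer_instance

-- ===== CLAIM (what is proved, stated in full; the proofs are below) =====
def Claim_equal_mergeAlternateSequence : Prop := ∀ (arr1 : List Int) (arr2 : List Int), Dom_mergeAlternateSequence arr1 arr2 → Pre_mergeAlternateSequence arr1 arr2 → Spec_mergeAlternateSequence arr1 arr2 (mergeAlternateSequence arr1 arr2)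

-- ===== LEMMAS AND PROOFS =====

-- the standard left-biased merge of two lists (A's comparison discipline)
def pvMerge : List Int → List Int → List Int
  | [], l2 => l2
  | l1, [] => l1
  | a :: as, b :: bs => if b < a then b :: pvMerge (a :: as) bs else a :: pvMerge as (b :: bs)
  termination_by l1 l2 => l1.length + l2.length
  decreasing_by all_goals simp

-- the strictly-increasing dedup filter both programs apply, last-kept value m
def pvDed (m : Int) : List Int → List Int
  | [] => []
  | x :: xs => if m < x then x :: pvDed x xs else pvDed m xs

theorem pvGetLastD_concat (l : List Int) (a d : Int) : (l ++ [a]).getLastD d = a := by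
  simp

theorem pvMerge_nil_left (l2 : List Int) : pvMerge [] l2 = l2 := by
  rw [pvMerge]

theorem pvMerge_nil_right (l1 : List Int) : pvMerge l1 [] = l1 := by
  cases l1 with
  | nil => rw [pvMerge]
  | cons a as => rw [pvMerge]; simp

theorem pvMerge_cons_cons (a b : Int) (as bs : List Int) :
    pvMerge (a :: as) (b :: bs)
      = if b < a then b :: pvMerge (a :: as) bs else a :: pvMerge as (b :: bs) := by
  rw [pvMerge]

-- B's filter fold computes pvDed
theorem pvFold_eq_ded : ∀ (l out : List Int), out ≠ [] →
    l.foldl (fun out v => if v > out.getLastD 0 then out ++ [v] else out) out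
      = out ++ pvDed (out.getLastD 0) l := by
  intro l
  induction l with
  | nil => intro out _; simp [pvDed]
  | cons x xs ih =>
      intro out hout
      simp only [List.foldl_cons, pvDed]
      by_cases hx : out.getLastD 0 < x
      · rw [if_pos (by exact hx), ih (out ++ [x]) (by simp), pvGetLastD_concat,
            if_pos hx]
        simp
      · rw [if_neg (by exact hx), ih out hout, if_neg hx]

-- A's merge loop computes pvDed of the left-biased merge of the two suffixes
theorem pvMergeLoop_eq (arr1 arr2 : List Int) :
    ∀ (fuel i j : Nat) (out : List Int),
      i ≤ arr1.length → j ≤ arr2.length →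
      arr1.length - i + (arr2.length - j) ≤ fuel → out ≠ [] →
      pvMergeLoop arr1 arr2 fuel i j out
        = out ++ pvDed (out.getLastD 0) (pvMerge (arr1.drop i) (arr2.drop j)) := by
  intro fuel
  induction fuel with
  | zero =>
      intro i j out hi hj hf _
      have hi' : i = arr1.length := by omega
      have hj' : j = arr2.length := by omega
      subst hi'; subst hj'
      simp [pvMergeLoop, List.drop_length, pvMerge_nil_left, pvDed]
  | succ fuel ih =>
      intro i j out hi hj hf hout
      by_cases hiL : i < arr1.length
      · have hd1 : arr1.drop i = arr1.getD i 0 :: arr1.drop (i+1) := by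
          rw [List.getD_eq_getElem arr1 0 hiL]; exact List.drop_eq_getElem_cons hiL
        by_cases hjL : j < arr2.length
        · have hd2 : arr2.drop j = arr2.getD j 0 :: arr2.drop (j+1) := by
            rw [List.getD_eq_getElem arr2 0 hjL]; exact List.drop_eq_getElem_cons hjL
          by_cases hba : arr2.getD j 0 < arr1.getD i 0
          · -- take from arr2
            rw [pvMergeLoop, if_pos (Or.inl hjL), if_pos (Or.inr ⟨hjL, hba⟩)]
            rw [hd1, hd2, pvMerge_cons_cons, if_pos hba, ← hd1]
            by_cases hgt : out.getLastD 0 < arr2.getD j 0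
            · rw [if_pos (by exact hgt), ih i (j+1) _ hi (by omega) (by omega) (by simp),
                  pvGetLastD_concat, pvDed, if_pos hgt]
              simp
            · rw [if_neg (by exact hgt), ih i (j+1) _ hi (by omega) (by omega) hout,
                  pvDed, if_neg hgt]
          · -- take from arr1
            have hab : arr1.getD i 0 ≤ arr2.getD j 0 := not_lt.mp hba
            rw [pvMergeLoop, if_pos (Or.inl hjL),
                if_neg (by simp only [not_or, not_and]; exact ⟨by omega, fun _ => hba⟩),
                if_pos (Or.inr ⟨hiL, hab⟩)]
            rw [hd1, hd2, pvMerge_cons_cons, if_neg hba, ← hd2]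
            by_cases hgt : out.getLastD 0 < arr1.getD i 0
            · rw [if_pos (by exact hgt), ih (i+1) j _ (by omega) hj (by omega) (by simp),
                  pvGetLastD_concat, pvDed, if_pos hgt]
              simp
            · rw [if_neg (by exact hgt), ih (i+1) j _ (by omega) hj (by omega) hout,
                  pvDed, if_neg hgt]
        · -- j = len2 : take from arr1
          have hj' : j = arr2.length := by omega
          have hd2 : arr2.drop j = [] := by rw [hj', List.drop_length]
          rw [pvMergeLoop, if_pos (Or.inr hiL),
              if_neg (by simp only [not_or, not_and]; exact ⟨by omega, fun h => absurd h hjL⟩),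
              if_pos (Or.inl hj')]
          rw [hd2, pvMerge_nil_right, hd1]
          by_cases hgt : out.getLastD 0 < arr1.getD i 0
          · rw [if_pos (by exact hgt), ih (i+1) j _ (by omega) hj (by omega) (by simp),
                pvGetLastD_concat, hd2, pvMerge_nil_right, pvDed, if_pos hgt]
            simp
          · rw [if_neg (by exact hgt), ih (i+1) j _ (by omega) hj (by omega) hout,
                hd2, pvMerge_nil_right, pvDed, if_neg hgt]
      · -- i = len1
        have hi' : i = arr1.length := by omega
        have hd1 : arr1.drop i = [] := by rw [hi', List.drop_length]
        by_cases hjL : j < arr2.length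
        · have hd2 : arr2.drop j = arr2.getD j 0 :: arr2.drop (j+1) := by
            rw [List.getD_eq_getElem arr2 0 hjL]; exact List.drop_eq_getElem_cons hjL
          rw [pvMergeLoop, if_pos (Or.inl hjL), if_pos (Or.inl hi')]
          rw [hd1, hd2, pvMerge_nil_left]
          by_cases hgt : out.getLastD 0 < arr2.getD j 0
          · rw [if_pos (by exact hgt), ih i (j+1) _ hi (by omega) (by omega) (by simp),
                pvGetLastD_concat, hd1, pvMerge_nil_left, pvDed, if_pos hgt]
            simp
          · rw [if_neg (by exact hgt), ih i (j+1) _ hi (by omega) (by omega) hout,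
                hd1, pvMerge_nil_left, pvDed, if_neg hgt]
        · have hj' : j = arr2.length := by omega
          rw [pvMergeLoop, if_neg (by omega)]
          rw [hd1, hj', List.drop_length, pvMerge_nil_left]
          simp [pvDed]

theorem pvMergeB_eq (xs ys : List Int) :
    ∀ (fuel a b : Nat) (merged : List Int),
      a ≤ xs.length → b ≤ ys.length →
      xs.length - a + (ys.length - b) ≤ fuel →
      pvMergeB xs ys fuel a b merged = merged ++ pvMerge (xs.drop a) (ys.drop b) := by
  intro fuel
  induction fuel with
  | zero =>
      intro a b merged ha hb hf
      have ha' : a = xs.length := by omega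
      have hb' : b = ys.length := by omega
      subst ha'; subst hb'
      simp [pvMergeB, List.drop_length, pvMerge_nil_left]
  | succ fuel ih =>
      intro a b merged ha hb hf
      by_cases hc : a < xs.length ∧ b < ys.length
      · have hda : xs.drop a = xs.getD a 0 :: xs.drop (a+1) := by
          rw [List.getD_eq_getElem xs 0 hc.1]; exact List.drop_eq_getElem_cons hc.1
        have hdb : ys.drop b = ys.getD b 0 :: ys.drop (b+1) := by
          rw [List.getD_eq_getElem ys 0 hc.2]; exact List.drop_eq_getElem_cons hc.2
        by_cases hba : ys.getD b 0 < xs.getD a 0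
        · rw [pvMergeB, if_pos hc, if_pos hba,
              ih a (b+1) _ ha (by omega) (by omega),
              hda, hdb, pvMerge_cons_cons, if_pos hba, ← hda]
          simp
        · rw [pvMergeB, if_pos hc, if_neg hba,
              ih (a+1) b _ (by omega) hb (by omega),
              hda, hdb, pvMerge_cons_cons, if_neg hba, ← hdb]
          simp
      · rw [pvMergeB, if_neg hc]
        by_cases hax : a < xs.length
        · have hb' : b = ys.length := by omega
          rw [hb', List.drop_length, pvMerge_nil_right]; simp
        · have ha' : a = xs.length := by omega
          rw [ha', List.drop_length, pvMerge_nil_left]; simp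

theorem pvScanStart_le (arr1 : List Int) (b : Int) :
    ∀ (fuel i : Nat), i ≤ arr1.length → pvScanStart arr1 b fuel i ≤ arr1.length := by
  intro fuel
  induction fuel with
  | zero => intro i hi; exact hi
  | succ fuel ih =>
      intro i hi
      rw [pvScanStart]
      cases hx : arr1[i+1]? with
      | none => exact hi
      | some x =>
          have hlt : i + 1 < arr1.length := (List.getElem?_eq_some_iff.mp hx).1
          by_cases hc : x < b
          · simp only [if_pos hc]; exact ih (i+1) (by omega)
          · simp only [if_neg hc]; exact hi

-- ===== VERDICT (by name: the statement is the Claim_ definition above) =====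
theorem mergeAlternateSequence_spec : Claim_equal_mergeAlternateSequence := by
  intro arr1 arr2 _ _
  unfold Spec_mergeAlternateSequence mergeAlternateSequence mergeAlternateSequence_alt
  dsimp only
  set i := pvScanStart arr1 (arr2.getD 0 0) arr1.length 0 with hidef
  have hile : i ≤ arr1.length := pvScanStart_le arr1 _ arr1.length 0 (by omega)
  rw [pvMergeLoop_eq arr1 arr2 _ i 0 _ hile (by omega) (by omega) (by simp),
      pvMergeB_eq (arr1.drop i) arr2 _ 0 0 [] (by omega) (by omega) (by omega),
      pvFold_eq_ded _ _ (by simp)]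
  simp
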